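-- pv_equiv track=rewrite | github.com/LukhasAI/Lukhas | candidate/core/security/migrate_xor_encryption.py | _is_crypto_related
-- ===== SOURCE A (Python) =====
-- def _is_crypto_related(context: str) -> bool:
--     """Check if XOR is used for encryption"""
--     crypto_keywords = [
--         "encrypt",
--         "decrypt",
--         "cipher",
--         "key",
--         "secret",
--         "token",
--         "password",
--         "hash",
--         "secure",
--         "crypto",
--     ]
--
--     context_lower = context.lower()
--     return any(keyword in context_lower for keyword in crypto_keywords)
-- ===== SOURCE B (Python) =====
-- def _is_crypto_related(context: str) -> bool:
--     """Check if XOR is used for encryption (single left-to-right scan over positions)."""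
--     keywords = ("encrypt", "decrypt", "cipher", "key", "secret",
--                 "token", "password", "hash", "secure", "crypto")
--     s = context.lower()
--     while s:
--         for kw in keywords:
--             if s.startswith(kw):
--                 return True
--         s = s[1:]
--     return False
-- ===== Notes on version B (the rewrite author's own statement) =====
-- stated objective: alternative
-- what changed: Instead of k independent full substring scans via any(kw in s), B makes one left-to-right scan over positions of the lowercased string and at each position checks whether any keyword starts there.
import Mathlib
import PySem

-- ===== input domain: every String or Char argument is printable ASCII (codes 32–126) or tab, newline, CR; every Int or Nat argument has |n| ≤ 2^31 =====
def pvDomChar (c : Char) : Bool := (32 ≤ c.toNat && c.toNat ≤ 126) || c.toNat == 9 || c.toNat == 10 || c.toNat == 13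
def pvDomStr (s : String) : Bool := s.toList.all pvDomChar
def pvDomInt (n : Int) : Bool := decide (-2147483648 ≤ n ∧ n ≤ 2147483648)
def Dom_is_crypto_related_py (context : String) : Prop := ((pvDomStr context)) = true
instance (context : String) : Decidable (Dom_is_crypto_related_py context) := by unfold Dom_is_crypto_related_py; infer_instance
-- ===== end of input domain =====

-- B replaces the any()-loop of per-keyword substring scans by one left-to-right scan over suffix
-- positions of the lowercased string, checking at each position whether any keyword starts there
-- (alternative, same cost).

-- ===== PORT A =====
def cryptoKeywords : List String :=
  ["encrypt", "decrypt", "cipher", "key", "secret", "token", "password", "hash", "secure", "crypto"]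

def is_crypto_related_py (context : String) : Bool :=
  let context_lower := PySem.Str.lower context
  cryptoKeywords.any (fun keyword => PySem.Str.isIn keyword context_lower)

-- ===== PORT B =====
-- Source B's while-loop over successive suffixes s, s[1:], …; `s.startswith(kw)` is PySem.Chars.startswith.
def scanCrypto (s : List Char) : Bool :=
  match s with
  | [] => false
  | c :: rest =>
    if cryptoKeywords.any (fun kw => PySem.Chars.startswith (c :: rest) kw.toList) then true
    else scanCrypto rest

def is_crypto_related_py_alt (context : String) : Bool :=
  scanCrypto (PySem.Chars.lower context.toList)

-- ===== PRECONDITION & SPEC =====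
def Spec_is_crypto_related_py (context : String) (out : Bool) : Prop := out = is_crypto_related_py_alt context
instance (context : String) (out : Bool) : Decidable (Spec_is_crypto_related_py context out) := by unfold Spec_is_crypto_related_py; infer_instance

-- ===== CLAIM (what is proved, stated in full; the proofs are below) =====
def Claim_equal_is_crypto_related_py : Prop := ∀ (context : String), Dom_is_crypto_related_py context → Spec_is_crypto_related_py context (is_crypto_related_py context)

-- ===== LEMMAS AND PROOFS =====

-- substring membership unfolds one position: kw is in (c :: rest) iff it starts there or is in rest
theorem isIn_cons_eq (kw : List Char) (c : Char) (rest : List Char) :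
    PySem.Chars.isIn kw (c :: rest)
      = (PySem.Chars.startswith (c :: rest) kw || PySem.Chars.isIn kw rest) := by
  rw [Bool.eq_iff_iff]
  simp [PySem.Chars.isIn_iff_infix, PySem.Chars.startswith_iff, List.infix_cons_iff]

-- any distributes over || pointwise
theorem any_or_distrib {α : Type} (L : List α) (f g : α → Bool) :
    L.any (fun x => f x || g x) = (L.any f || L.any g) := by
  rw [Bool.eq_iff_iff]
  simp only [List.any_eq_true, Bool.or_eq_true]
  constructor
  · rintro ⟨x, hx, h | h⟩
    · exact Or.inl ⟨x, hx, h⟩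
    · exact Or.inr ⟨x, hx, h⟩
  · rintro (⟨x, hx, h⟩ | ⟨x, hx, h⟩)
    · exact ⟨x, hx, Or.inl h⟩
    · exact ⟨x, hx, Or.inr h⟩

-- the scan over positions computes the same as the any()-loop over keywords
theorem scan_eq_any (s : List Char) :
    cryptoKeywords.any (fun kw => PySem.Chars.isIn kw.toList s) = scanCrypto s := by
  induction s with
  | nil => decide
  | cons c rest ih =>
    have h1 : cryptoKeywords.any (fun kw => PySem.Chars.isIn kw.toList (c :: rest))
        = (cryptoKeywords.any (fun kw => PySem.Chars.startswith (c :: rest) kw.toList)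
           || cryptoKeywords.any (fun kw => PySem.Chars.isIn kw.toList rest)) := by
      rw [← any_or_distrib]
      simp only [isIn_cons_eq]
    rw [h1, ih, scanCrypto]
    cases cryptoKeywords.any (fun kw => PySem.Chars.startswith (c :: rest) kw.toList) <;> simp

-- ===== VERDICT (by name: the statement is the Claim_ definition above) =====
theorem is_crypto_related_py_spec : Claim_equal_is_crypto_related_py := by
  intro context _
  unfold Spec_is_crypto_related_py is_crypto_related_py is_crypto_related_py_alt
  rw [← scan_eq_any]
  simp [PySem.Str.isIn]
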